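-- pv_equiv track=rewrite | github.com/Dustzx/DEformer | data_utils.py | compute_num_sxs
-- ===== SOURCE A (Python) =====
-- def compute_num_sxs(samples):
--     num_yes_imp_sxs = 0
--     num_no_imp_sxs = 0
--     num_not_sure_imp_sxs = 0
--     for sample in samples:
--         for sx, attr in sample['imp_sxs'].items():
--             if attr == '0':
--                 num_no_imp_sxs += 1
--             elif attr == '1':
--                 num_yes_imp_sxs += 1
--             else:
--                 num_not_sure_imp_sxs += 1
--     return num_yes_imp_sxs, num_no_imp_sxs, num_not_sure_imp_sxs
-- ===== SOURCE B (Python) =====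
-- def compute_num_sxs(samples):
--     # Staged passes: flatten all implicit-symptom attribute values once, then
--     # use list.count for the '1' and '0' tallies; everything else is not-sure.
--     attrs = [a for sample in samples for a in sample['imp_sxs'].values()]
--     num_yes = attrs.count('1')
--     num_no = attrs.count('0')
--     return num_yes, num_no, len(attrs) - num_yes - num_no
-- ===== Notes on version B (the rewrite author's own statement) =====
-- stated objective: simpler
-- what changed: Replaces A's single pass with three running counters and a per-item three-way branch by flattening all attribute values once and taking staged list.count passes for '1' and '0', deriving not-sure by subtraction.
import Mathlib
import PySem

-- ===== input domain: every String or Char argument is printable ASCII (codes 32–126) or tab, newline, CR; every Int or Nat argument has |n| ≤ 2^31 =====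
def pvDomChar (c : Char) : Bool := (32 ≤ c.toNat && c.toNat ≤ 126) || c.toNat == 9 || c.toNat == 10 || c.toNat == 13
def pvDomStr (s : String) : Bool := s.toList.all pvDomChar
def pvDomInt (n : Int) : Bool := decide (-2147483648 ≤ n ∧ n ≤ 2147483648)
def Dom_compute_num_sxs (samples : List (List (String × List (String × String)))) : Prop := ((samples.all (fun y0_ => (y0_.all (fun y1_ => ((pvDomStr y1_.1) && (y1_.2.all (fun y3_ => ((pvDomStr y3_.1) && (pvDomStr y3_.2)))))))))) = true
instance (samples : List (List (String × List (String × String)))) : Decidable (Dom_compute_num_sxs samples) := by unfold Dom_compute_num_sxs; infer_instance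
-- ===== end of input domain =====

-- B flattens the attribute values once and derives the triple by staged count passes
-- instead of A's per-item three-way branch with three running counters; equal on Pre_.

-- ===== PORT A =====
-- three running counters, per-item three-way branch (A's loop, step for step)
def compute_num_sxs (samples : List (List (String × List (String × String)))) : Int × Int × Int :=
  samples.foldl
    (fun acc sample =>
      (((PySem.Dict.mk sample).get? "imp_sxs").getD []).foldl
        (fun acc p =>
          if p.2 = "0" then (acc.1, acc.2.1 + 1, acc.2.2)
          else if p.2 = "1" then (acc.1 + 1, acc.2.1, acc.2.2)
          else (acc.1, acc.2.1, acc.2.2 + 1))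
        acc)
    ((0 : Int), (0 : Int), (0 : Int))

-- ===== PORT B =====
-- the attribute values one sample contributes: sample['imp_sxs'].values()
def pvAttrsOf (sample : List (String × List (String × String))) : List String :=
  (((PySem.Dict.mk sample).get? "imp_sxs").getD []).map (·.2)

-- flatten once, staged count passes, derive the remainder by subtraction
def compute_num_sxs_alt (samples : List (List (String × List (String × String)))) : Int × Int × Int :=
  let attrs := samples.flatMap pvAttrsOf
  let num_yes : Int := PySem.List.count attrs "1"
  let num_no : Int := PySem.List.count attrs "0"
  (num_yes, num_no, PySem.List.len attrs - num_yes - num_no)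

-- ===== PRECONDITION & SPEC =====
-- Pre_ excludes samples missing the 'imp_sxs' key, on which Python A raises KeyError.
def Pre_compute_num_sxs (samples : List (List (String × List (String × String)))) : Prop :=
  (samples.all (fun sample => sample.any (fun p => p.1 == "imp_sxs"))) = true
instance (samples : List (List (String × List (String × String)))) : Decidable (Pre_compute_num_sxs samples) := by unfold Pre_compute_num_sxs; infer_instance

def pvWitness_compute_num_sxs : (List (List (String × List (String × String)))) :=
  [[("imp_sxs", [("cough", "1"), ("fever", "0"), ("pain", "2")])], [("imp_sxs", [])]]

def Spec_compute_num_sxs (samples : List (List (String × List (String × String)))) (out : Int × Int × Int) : Prop := out = compute_num_sxs_alt samples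
instance (samples : List (List (String × List (String × String)))) (out : Int × Int × Int) : Decidable (Spec_compute_num_sxs samples out) := by unfold Spec_compute_num_sxs; infer_instance

-- ===== CLAIM =====
def Claim_equal_compute_num_sxs : Prop := ∀ (samples : List (List (String × List (String × String)))), Dom_compute_num_sxs samples → Pre_compute_num_sxs samples → Spec_compute_num_sxs samples (compute_num_sxs samples)

-- ===== LEMMAS AND PROOFS =====

-- A's inner loop counts '1's, '0's and the rest of the sample's attribute values
lemma inner_spec (l : List (String × String)) (acc : Int × Int × Int) :
    l.foldl
      (fun acc p =>
        if p.2 = "0" then (acc.1, acc.2.1 + 1, acc.2.2)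
        else if p.2 = "1" then (acc.1 + 1, acc.2.1, acc.2.2)
        else (acc.1, acc.2.1, acc.2.2 + 1)) acc
    = (acc.1 + ((l.map (·.2)).count "1" : Int),
       acc.2.1 + ((l.map (·.2)).count "0" : Int),
       acc.2.2 + ((l.length : Int) - ((l.map (·.2)).count "1" : Int) - ((l.map (·.2)).count "0" : Int))) := by
  induction l generalizing acc with
  | nil => simp
  | cons p l ih =>
      simp only [List.foldl_cons, List.map_cons, List.count_cons, List.length_cons]
      rw [ih]
      by_cases h0 : p.2 = "0"
      · simp [h0, Prod.ext_iff]; omega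
      · by_cases h1 : p.2 = "1"
        · simp [h1, Prod.ext_iff]; omega
        · simp [h0, h1, Prod.ext_iff]; omega

-- A's outer loop, over the concatenation of all samples' attribute values
lemma outer_spec (samples : List (List (String × List (String × String)))) (acc : Int × Int × Int) :
    samples.foldl
      (fun acc sample =>
        (((PySem.Dict.mk sample).get? "imp_sxs").getD []).foldl
          (fun acc p =>
            if p.2 = "0" then (acc.1, acc.2.1 + 1, acc.2.2)
            else if p.2 = "1" then (acc.1 + 1, acc.2.1, acc.2.2)
            else (acc.1, acc.2.1, acc.2.2 + 1)) acc) acc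
    = (acc.1 + ((samples.flatMap pvAttrsOf).count "1" : Int),
       acc.2.1 + ((samples.flatMap pvAttrsOf).count "0" : Int),
       acc.2.2 + (((samples.flatMap pvAttrsOf).length : Int)
                  - ((samples.flatMap pvAttrsOf).count "1" : Int)
                  - ((samples.flatMap pvAttrsOf).count "0" : Int))) := by
  induction samples generalizing acc with
  | nil => simp
  | cons s rest ih =>
      simp only [List.foldl_cons, List.flatMap_cons, List.count_append, List.length_append]
      rw [inner_spec, ih]
      simp only [pvAttrsOf, Prod.ext_iff, List.length_map]
      push_cast
      refine ⟨by omega, by omega, by omega⟩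

-- ===== VERDICT =====
theorem compute_num_sxs_spec : Claim_equal_compute_num_sxs := by
  intro samples _ _
  unfold Spec_compute_num_sxs compute_num_sxs compute_num_sxs_alt
  rw [outer_spec]
  simp only [PySem.List.count_eq, PySem.List.len_eq, Prod.ext_iff]
  exact ⟨by ring, by ring, by ring⟩
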